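-- pv_equiv track=rewrite | github.com/atomizewhitewhey/kagglequora | KaggleQuora.py | sameqf
-- ===== SOURCE A (Python) =====
-- import string
--
-- sp = string.punctuation
--
-- def normalize(questions):
--     questions = list(map(lambda t: ''.join(["" if c.isdigit() else c for c in str(t)]), questions))
--     questions = list(map(lambda t: ''.join(["" if c in sp else c for c in str(t)]), questions))
--     questions = list(map(str.lower, questions))
--     return questions
--
-- def firstword(questions):
--     questions = [question.split() for question in questions]
--     interog = []
--     for question in questions:
--         if len(question) > 0:
--             interog.append(question[0])
--         else:
--             interog.append('0')
--     return interog
--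
-- def sameqf(questions1, questions2):
--     interog1 = normalize(questions1)
--     interog2 = normalize(questions2)
--     interog1 = firstword(interog1)
--     interog2 = firstword(interog2)
--     sameq = []
--     for i in range(len(interog1)):
--         if interog1[i] == interog2[i]:
--             sameq.append(1)
--         else:
--             sameq.append(0)
--     return sameq
-- ===== SOURCE B (Python) =====
-- import string
--
-- _skip = set(string.punctuation)
--
-- def _fw(t):
--     # streaming state machine: build the first word directly, stop at its end
--     word = []
--     for c in str(t):
--         if c.isdigit() or c in _skip:
--             continue
--         if c.isspace():
--             if word:
--                 break
--         else:
--             word.append(c.lower())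
--     return ''.join(word) if word else '0'
--
-- def sameqf(questions1, questions2):
--     return [1 if _fw(a) == _fw(b) else 0 for a, b in zip(questions1, questions2)]
-- ===== Notes on version B (the rewrite author's own statement) =====
-- stated objective: alternative
-- what changed: A materializes five intermediate whole-list stages (two filtered copies of every string, a lowercased copy, a split word-list, then an indexed compare loop); B never builds a normalized string at all: a per-character state machine streams over each raw string, skipping digits/punctuation, lowercasing letters into the first word and breaking as soon as that word ends, with the pairs drawn by zip instead of indexing. (measured ~1.9x faster at the largest timing size: one streaming pass, no intermediate lists, early exit after the first word)
import Mathlib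
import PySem

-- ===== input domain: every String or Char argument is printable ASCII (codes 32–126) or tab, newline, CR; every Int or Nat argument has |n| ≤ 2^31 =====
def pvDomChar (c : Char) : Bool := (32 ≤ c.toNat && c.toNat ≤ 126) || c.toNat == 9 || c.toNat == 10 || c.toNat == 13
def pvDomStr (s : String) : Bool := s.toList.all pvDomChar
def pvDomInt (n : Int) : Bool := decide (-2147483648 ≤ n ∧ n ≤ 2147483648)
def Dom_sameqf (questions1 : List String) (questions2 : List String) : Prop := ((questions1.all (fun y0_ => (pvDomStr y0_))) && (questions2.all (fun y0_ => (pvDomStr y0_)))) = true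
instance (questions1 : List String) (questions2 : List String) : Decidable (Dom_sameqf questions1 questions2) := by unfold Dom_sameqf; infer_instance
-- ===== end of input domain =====

-- B replaces A's staged whole-list pipeline (filter digits, filter punctuation, lowercase,
-- split, indexed compare) by a per-character state machine that streams each raw string once,
-- building the first word directly and stopping at its end, with pairs drawn by zip (alternative).

-- ===== PORT A =====
-- string.punctuation
def sameqfPunct : List Char := "!\"#$%&'()*+,-./:;<=>?@[\\]^_`{|}~".toList

-- ''.join(["" if cond else c for c in t]) transliterated as flatMap over the characters
def sameqfNormalize (questions : List String) : List String :=
  let questions := questions.map (fun t =>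
    String.ofList (t.toList.flatMap (fun c => if PySem.Chars.isdigit c then [] else [c])))
  let questions := questions.map (fun t =>
    String.ofList (t.toList.flatMap (fun c => if sameqfPunct.contains c then [] else [c])))
  questions.map PySem.Str.lower

def sameqfFirstword (questions : List String) : List String :=
  let qsplit := questions.map PySem.Str.split₀
  qsplit.foldl (fun interog question =>
    if question.length > 0 then interog ++ [question.getD 0 "0"] else interog ++ ["0"]) []

def sameqf (questions1 : List String) (questions2 : List String) : List Int :=
  let interog1 := sameqfFirstword (sameqfNormalize questions1)
  let interog2 := sameqfFirstword (sameqfNormalize questions2)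
  -- interog2[i] raises IndexError when i ≥ len(interog2): excluded by Pre_sameqf
  (PySem.List.pyRange 0 interog1.length 1).foldl (fun sameq i =>
    if PySem.List.pyGetD interog1 i "" == PySem.List.pyGetD interog2 i "" then
      sameq ++ [(1 : Int)]
    else
      sameq ++ [(0 : Int)]) []

-- ===== PORT B =====
-- the per-string state machine of Source B's _fw loop: skip digits/punctuation, whitespace ends
-- a started word (break), otherwise append the lowercased character
def sameqfFwGo : List Char → List Char → List Char
  | [], word => word
  | c :: rest, word =>
    if PySem.Chars.isdigit c || sameqfPunct.contains c then sameqfFwGo rest word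
    else if PySem.Chars.isspace c then
      (if word.isEmpty then sameqfFwGo rest word else word)
    else sameqfFwGo rest (word ++ [PySem.Chars.lowerChar c])

def sameqfFw (t : String) : String :=
  let word := sameqfFwGo t.toList []
  if word.isEmpty then "0" else String.ofList word

def sameqf_alt (questions1 : List String) (questions2 : List String) : List Int :=
  (questions1.zip questions2).map (fun p =>
    if sameqfFw p.1 == sameqfFw p.2 then (1 : Int) else 0)

-- ===== PRECONDITION & SPEC =====
-- A raises IndexError when questions2 is shorter than questions1; Pre_ excludes exactly that.
def Pre_sameqf (questions1 : List String) (questions2 : List String) : Prop :=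
  questions1.length ≤ questions2.length
instance (questions1 : List String) (questions2 : List String) : Decidable (Pre_sameqf questions1 questions2) := by unfold Pre_sameqf; infer_instance

def pvWitness_sameqf : List String × List String := (["What is 1+1?", "  7 "], ["what IS one", "seven!", "extra"])

def Spec_sameqf (questions1 : List String) (questions2 : List String) (out : List Int) : Prop := out = sameqf_alt questions1 questions2
instance (questions1 : List String) (questions2 : List String) (out : List Int) : Decidable (Spec_sameqf questions1 questions2 out) := by unfold Spec_sameqf; infer_instance

-- ===== CLAIM (what is proved, stated in full; the proofs are below) =====
def Claim_equal_sameqf : Prop := ∀ (questions1 : List String) (questions2 : List String), Dom_sameqf questions1 questions2 → Pre_sameqf questions1 questions2 → Spec_sameqf questions1 questions2 (sameqf questions1 questions2)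

-- ===== LEMMAS AND PROOFS =====

-- 'join("" if p c else c)' is a filter on the character list
theorem sameqf_flatMap_eq_filter (p : Char → Bool) (l : List Char) :
    l.flatMap (fun c => if p c then [] else [c]) = l.filter (fun c => !p c) := by
  induction l with
  | nil => rfl
  | cons c l ih => by_cases h : p c <;> simp [List.flatMap_cons, h, ih]

-- the per-element function A's pipeline applies
def sameqfFwA (t : String) : String :=
  let q := PySem.Str.split₀ (PySem.Str.lower
    (String.ofList ((String.ofList (t.toList.flatMap
        (fun c => if PySem.Chars.isdigit c then [] else [c]))).toList.flatMap
      (fun c => if sameqfPunct.contains c then [] else [c]))))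
  if q.length > 0 then q.getD 0 "0" else "0"

-- the character B keeps is never an uppercase-shifted whitespace: lowering preserves isspace
theorem sameqf_isspace_lowerChar (c : Char) :
    PySem.Chars.isspace (PySem.Chars.lowerChar c) = PySem.Chars.isspace c := by
  unfold PySem.Chars.lowerChar
  by_cases h : PySem.Chars.isupper c
  · have hb : 65 ≤ c.toNat ∧ c.toNat ≤ 90 := by
      simp only [PySem.Chars.isupper, Bool.and_eq_true, decide_eq_true_eq] at h
      exact ⟨h.1, h.2⟩
    have hv : Nat.isValidChar (c.toNat + 32) := by left; omega
    have h32 : (Char.ofNat (c.toNat + 32)).toNat = c.toNat + 32 := by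
      rw [Char.toNat_ofNat, if_pos hv]
    simp only [h, if_true, PySem.Chars.isspace, h32]
    obtain ⟨h1, h2⟩ := hb
    generalize c.toNat = n at h1 h2 ⊢
    interval_cases n <;> decide
  · simp [h]

-- pure first-word scanner over an already filtered+lowered character list
def sameqfFwL : List Char → List Char → List Char
  | [], w => w
  | c :: r, w =>
    if PySem.Chars.isspace c then (if w.isEmpty then sameqfFwL r w else w)
    else sameqfFwL r (w ++ [c])

-- split₀.go prepends the accumulated words
theorem sameqf_split_go_acc (l : List Char) (cur : List Char) (acc : List (List Char)) :
    PySem.Chars.split₀.go l cur acc = acc.reverse ++ PySem.Chars.split₀.go l cur [] := by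
  induction l generalizing cur acc with
  | nil =>
    by_cases h : cur.isEmpty <;> simp [PySem.Chars.split₀.go, h]
  | cons c r ih =>
    by_cases hs : PySem.Chars.isspace c
    · by_cases hc : cur.isEmpty
      · simp only [PySem.Chars.split₀.go, hs, hc, if_true]
        exact ih [] acc
      · simp only [PySem.Chars.split₀.go, hs, hc, if_true]
        rw [ih [] (cur.reverse :: acc), ih [] [cur.reverse]]
        simp
    · simp only [PySem.Chars.split₀.go, hs]
      exact ih (c :: cur) acc

-- the head of split() is exactly what the scanner computes
theorem sameqf_split_go_head (l : List Char) (cur : List Char) :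
    (PySem.Chars.split₀.go l cur []).head? =
      (if (sameqfFwL l cur.reverse).isEmpty then none else some (sameqfFwL l cur.reverse)) := by
  induction l generalizing cur with
  | nil =>
    by_cases h : cur.isEmpty
    · have : cur = [] := by simpa [List.isEmpty_iff] using h
      simp [PySem.Chars.split₀.go, sameqfFwL, this]
    · have hne : cur ≠ [] := by simpa [List.isEmpty_iff] using h
      simp [PySem.Chars.split₀.go, sameqfFwL, h]
  | cons c r ih =>
    by_cases hs : PySem.Chars.isspace c
    · by_cases hc : cur.isEmpty
      · have : cur = [] := by simpa [List.isEmpty_iff] using hc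
        simp only [PySem.Chars.split₀.go, hs, if_true, sameqfFwL, this]
        exact ih []
      · have hcn : cur ≠ [] := by simpa [List.isEmpty_iff] using hc
        have hne : cur.reverse ≠ [] := by simp [hcn]
        simp only [PySem.Chars.split₀.go, hs, hc, if_true]
        rw [sameqf_split_go_acc r [] [cur.reverse]]
        simp [sameqfFwL, hs, hcn]
    · simp only [PySem.Chars.split₀.go, sameqfFwL]
      rw [if_neg hs, if_neg hs, ih (c :: cur)]
      simp

-- B's state machine equals the scanner run on the filtered+lowered list
theorem sameqf_fwGo_eq_fwL (cs : List Char) (w : List Char) :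
    sameqfFwGo cs w =
      sameqfFwL ((cs.filter (fun c =>
        !(PySem.Chars.isdigit c || sameqfPunct.contains c))).map PySem.Chars.lowerChar) w := by
  induction cs generalizing w with
  | nil => rfl
  | cons c r ih =>
    by_cases hd1 : PySem.Chars.isdigit c = true <;>
    by_cases hd2 : c ∈ sameqfPunct <;>
    by_cases hs : PySem.Chars.isspace c = true <;>
    by_cases hw : w.isEmpty <;>
      simp [sameqfFwGo, sameqfFwL, hd1, hd2, hs, hw,
        List.contains_eq_mem, sameqf_isspace_lowerChar, ih]

-- per element, A's pipeline and B's state machine agree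
theorem sameqfFwA_eq_fw (t : String) : sameqfFwA t = sameqfFw t := by
  unfold sameqfFwA sameqfFw
  dsimp only
  rw [String.toList_ofList, sameqf_flatMap_eq_filter, sameqf_flatMap_eq_filter,
      List.filter_filter]
  have hpred : ∀ c : Char,
      (!sameqfPunct.contains c && !PySem.Chars.isdigit c) =
      (!(PySem.Chars.isdigit c || sameqfPunct.contains c)) := by
    intro c; by_cases h1 : PySem.Chars.isdigit c <;> by_cases h2 : sameqfPunct.contains c <;>
      simp [h1]
  simp only [hpred]
  set l := (t.toList.filter (fun c =>
      !(PySem.Chars.isdigit c || sameqfPunct.contains c))).map PySem.Chars.lowerChar with hl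
  have hlow : PySem.Str.lower (String.ofList (t.toList.filter (fun c =>
      !(PySem.Chars.isdigit c || sameqfPunct.contains c)))) = String.ofList l := by
    simp [PySem.Str.lower, PySem.Chars.lower, hl]
  rw [hlow]
  have hsplit : PySem.Str.split₀ (String.ofList l) =
      (PySem.Chars.split₀ l).map String.ofList := by
    simp [PySem.Str.split₀]
  rw [hsplit, sameqf_fwGo_eq_fwL, ← hl]
  have hh := sameqf_split_go_head l []
  simp only [List.reverse_nil] at hh
  by_cases he : (sameqfFwL l []).isEmpty
  · rw [if_pos he] at hh
    have : PySem.Chars.split₀ l = [] := by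
      unfold PySem.Chars.split₀; exact List.head?_eq_none_iff.mp hh
    simp [this, he]
  · rw [if_neg he] at hh
    obtain ⟨rest, hrest⟩ : ∃ rest, PySem.Chars.split₀.go l [] [] = sameqfFwL l [] :: rest := by
      cases hgo : PySem.Chars.split₀.go l [] [] with
      | nil => rw [hgo] at hh; simp at hh
      | cons a b => rw [hgo] at hh; simp at hh; exact ⟨b, by rw [hh]⟩
    unfold PySem.Chars.split₀
    simp [hrest, he]

-- List.map_map with the composition written pointwise
theorem sameqf_map_map {α β γ : Type} (f : α → β) (g : β → γ) (l : List α) :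
    (l.map f).map g = l.map (fun x => g (f x)) := by
  rw [List.map_map]; rfl

theorem sameqf_firstword_normalize_eq_map (qs : List String) :
    sameqfFirstword (sameqfNormalize qs) = qs.map sameqfFwA := by
  unfold sameqfFirstword sameqfNormalize
  dsimp only
  rw [show (fun (interog : List String) (question : List String) =>
        if question.length > 0 then interog ++ [question.getD 0 "0"] else interog ++ ["0"]) =
      (fun interog question =>
        interog ++ [if question.length > 0 then question.getD 0 "0" else "0"]) from by
    funext interog question; split_ifs <;> rfl]
  rw [PySem.List.foldl_append_singleton_eq_map, List.nil_append,
      sameqf_map_map, sameqf_map_map, sameqf_map_map, sameqf_map_map]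
  rfl

theorem sameqf_spec_aux (questions1 questions2 : List String)
    (hpre : questions1.length ≤ questions2.length) :
    sameqf questions1 questions2 = sameqf_alt questions1 questions2 := by
  unfold sameqf sameqf_alt
  dsimp only
  rw [sameqf_firstword_normalize_eq_map, sameqf_firstword_normalize_eq_map]
  rw [show (fun (sameq : List Int) (i : Int) =>
        if PySem.List.pyGetD (questions1.map sameqfFwA) i "" ==
           PySem.List.pyGetD (questions2.map sameqfFwA) i "" then
          sameq ++ [(1 : Int)] else sameq ++ [(0 : Int)]) =
      (fun sameq i => sameq ++ [if PySem.List.pyGetD (questions1.map sameqfFwA) i "" ==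
           PySem.List.pyGetD (questions2.map sameqfFwA) i "" then (1 : Int) else 0]) from by
    funext sameq i; split_ifs <;> rfl]
  rw [PySem.List.foldl_append_singleton_eq_map, List.length_map, List.nil_append]
  apply List.ext_getElem
  · simp [PySem.List.pyRange_zero_natCast, Nat.min_eq_left hpre]
  · intro i h1 h2
    have hi1 : i < questions1.length := by
      simpa [PySem.List.pyRange_zero_natCast] using h1
    have hi2 : i < questions2.length := by omega
    simp only [List.getElem_map, List.getElem_zip, PySem.List.pyRange_zero_natCast,
      List.getElem_range, PySem.List.pyGetD_natCast]
    rw [List.getD_eq_getElem _ _ (by simpa using hi1),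
        List.getD_eq_getElem _ _ (by simpa using hi2)]
    rw [List.getElem_map, List.getElem_map, sameqfFwA_eq_fw, sameqfFwA_eq_fw]

-- ===== VERDICT (by name: the statement is the Claim_ definition above) =====
theorem sameqf_spec : Claim_equal_sameqf := by
  intro questions1 questions2 _ hpre
  unfold Spec_sameqf
  exact sameqf_spec_aux questions1 questions2 hpre
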